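-- pv_equiv track=rewrite | github.com/tamiemognato/ICPesquisaOperacional | FUNCTIONS/ALGORITHM1functions.py | min_time_arr_at_berth
-- ===== SOURCE A (Python) =====
-- import copy
--
-- def min_time_arr_at_berth(list_time_departure_of_current_berth, int_eta_ship_of_current_ship):    #(current_berth['time_departure'],current_ship['eta_ship'])
--     aux_list_departure_of_current_berth = copy.deepcopy(list_time_departure_of_current_berth)
--     aux_int_eta_ship_of_current_ship = int_eta_ship_of_current_ship
--
--     count = 0
--     while count < len(aux_list_departure_of_current_berth):
--         if (aux_list_departure_of_current_berth[count] + 1) < aux_int_eta_ship_of_current_ship: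
--             del(aux_list_departure_of_current_berth[count])
--         count += 1
--
--     if aux_list_departure_of_current_berth == []:
--         min_time_arr = int_eta_ship_of_current_ship
--     else:
--         min_time_arr = max(aux_list_departure_of_current_berth) + 1
--
--     return min_time_arr
-- ===== SOURCE B (Python) =====
-- def min_time_arr_at_berth(list_time_departure_of_current_berth, int_eta_ship_of_current_ship):
--     # earliest feasible arrival: the ship's eta, pushed past every departure
--     best = int_eta_ship_of_current_ship
--     for t in list_time_departure_of_current_berth:
--         if t + 1 > best:
--             best = t + 1
--     return best
-- ===== Notes on version B (the rewrite author's own statement) =====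
-- stated objective: faster
-- what changed: Replaced the while-loop that filters by deleting from the list in place (O(n) del per hit, then a max pass) with a single pass that pushes the eta past every departure (running max of eta and t+1).
-- intended difference: When every departure t satisfies t+1 < eta and the list has at least two elements, A's delete-while-iterating skip keeps every other element and returns max(those)+1, a time strictly earlier than the ship's eta; B returns eta, the intended earliest arrival when no departure conflicts. — e.g. on min_time_arr_at_berth([0, 1], 5): A returns 2, B returns 5
import Mathlib
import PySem

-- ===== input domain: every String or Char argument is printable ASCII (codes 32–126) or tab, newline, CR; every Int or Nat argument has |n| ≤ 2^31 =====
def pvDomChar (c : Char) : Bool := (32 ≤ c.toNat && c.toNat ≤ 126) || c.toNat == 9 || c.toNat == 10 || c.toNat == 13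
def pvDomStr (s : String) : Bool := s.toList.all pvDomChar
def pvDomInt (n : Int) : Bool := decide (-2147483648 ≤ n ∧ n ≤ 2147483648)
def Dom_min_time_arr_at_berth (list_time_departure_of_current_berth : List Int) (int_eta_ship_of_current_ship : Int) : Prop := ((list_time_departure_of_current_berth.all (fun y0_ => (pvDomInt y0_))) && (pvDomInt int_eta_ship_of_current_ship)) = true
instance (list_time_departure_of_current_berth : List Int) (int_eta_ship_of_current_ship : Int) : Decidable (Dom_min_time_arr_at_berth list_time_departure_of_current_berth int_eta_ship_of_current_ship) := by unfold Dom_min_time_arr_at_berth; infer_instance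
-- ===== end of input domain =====

-- B replaces A's in-place-deleting while-loop (quadratic filter, then max) with
-- one O(n) pass pushing the eta past every departure (running max of eta and t+1).
-- ===== PORT A =====
-- A: while-loop with index over a list mutated by del; after a deletion the
-- index still advances, skipping the next element (kept unexamined).
def pvAWhile (l : List Int) (count : Nat) (eta : Int) : List Int :=
  if h : count < l.length then
    if l[count] + 1 < eta then
      pvAWhile (l.eraseIdx count) (count + 1) eta
    else
      pvAWhile l (count + 1) eta
  else l
termination_by l.length - count
decreasing_by
  · simp [List.length_eraseIdx, h]; omega
  · omega

def min_time_arr_at_berth (list_time_departure_of_current_berth : List Int) (int_eta_ship_of_current_ship : Int) : Int :=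
  let aux := pvAWhile list_time_departure_of_current_berth 0 int_eta_ship_of_current_ship
  if aux = [] then int_eta_ship_of_current_ship
  else
    -- max(aux): aux ≠ [] here, so max? is some; the getD default is never used
    (PySem.List.max? aux (fun y => y)).getD int_eta_ship_of_current_ship + 1

-- ===== PORT B =====
-- B: one pass, running best = max of eta and every t + 1.
def min_time_arr_at_berth_alt (list_time_departure_of_current_berth : List Int) (int_eta_ship_of_current_ship : Int) : Int :=
  list_time_departure_of_current_berth.foldl
    (fun best t => if t + 1 > best then t + 1 else best)
    int_eta_ship_of_current_ship

-- ===== PRECONDITION & SPEC =====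
-- When every departure t has t+1 < eta and the list has ≥ 2 elements, A's
-- delete-while-iterating skip keeps every other element and returns max(those)+1,
-- strictly earlier than the ship's eta; B returns eta, the intended earliest arrival.
def D_min_time_arr_at_berth (list_time_departure_of_current_berth : List Int) (int_eta_ship_of_current_ship : Int) : Prop :=
  (∀ t ∈ list_time_departure_of_current_berth, t + 1 < int_eta_ship_of_current_ship) ∧
    2 ≤ list_time_departure_of_current_berth.length
instance (list_time_departure_of_current_berth : List Int) (int_eta_ship_of_current_ship : Int) : Decidable (D_min_time_arr_at_berth list_time_departure_of_current_berth int_eta_ship_of_current_ship) := by unfold D_min_time_arr_at_berth; infer_instance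

def Spec_min_time_arr_at_berth (list_time_departure_of_current_berth : List Int) (int_eta_ship_of_current_ship : Int) (out : Int) : Prop := ¬ D_min_time_arr_at_berth list_time_departure_of_current_berth int_eta_ship_of_current_ship → out = min_time_arr_at_berth_alt list_time_departure_of_current_berth int_eta_ship_of_current_ship
instance (list_time_departure_of_current_berth : List Int) (int_eta_ship_of_current_ship : Int) (out : Int) : Decidable (Spec_min_time_arr_at_berth list_time_departure_of_current_berth int_eta_ship_of_current_ship out) := by unfold Spec_min_time_arr_at_berth; infer_instance

def pvDiffWitness_min_time_arr_at_berth : List Int × Int := ([0, 1], 5)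
def pvDiffWitnessOut_min_time_arr_at_berth : Int × Int := (2, 5)

-- ===== CLAIM (what is proved, stated in full; the proofs are below) =====
def Claim_unchanged_min_time_arr_at_berth : Prop := ∀ (list_time_departure_of_current_berth : List Int) (int_eta_ship_of_current_ship : Int), Dom_min_time_arr_at_berth list_time_departure_of_current_berth int_eta_ship_of_current_ship → Spec_min_time_arr_at_berth list_time_departure_of_current_berth int_eta_ship_of_current_ship (min_time_arr_at_berth list_time_departure_of_current_berth int_eta_ship_of_current_ship)
def Claim_changed_min_time_arr_at_berth : Prop := Dom_min_time_arr_at_berth (pvDiffWitness_min_time_arr_at_berth.1) (pvDiffWitness_min_time_arr_at_berth.2) ∧ D_min_time_arr_at_berth (pvDiffWitness_min_time_arr_at_berth.1) (pvDiffWitness_min_time_arr_at_berth.2) ∧ min_time_arr_at_berth (pvDiffWitness_min_time_arr_at_berth.1) (pvDiffWitness_min_time_arr_at_berth.2) = pvDiffWitnessOut_min_time_arr_at_berth.1 ∧ min_time_arr_at_berth_alt (pvDiffWitness_min_time_arr_at_berth.1) (pvDiffWitness_min_time_arr_at_berth.2) = pvDiffWitnessOut_min_time_arr_at_berth.2 ∧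 pvDiffWitnessOut_min_time_arr_at_berth.1 ≠ pvDiffWitnessOut_min_time_arr_at_berth.2
def Claim_exact_min_time_arr_at_berth : Prop := ∀ (list_time_departure_of_current_berth : List Int) (int_eta_ship_of_current_ship : Int), Dom_min_time_arr_at_berth list_time_departure_of_current_berth int_eta_ship_of_current_ship → D_min_time_arr_at_berth list_time_departure_of_current_berth int_eta_ship_of_current_ship → min_time_arr_at_berth list_time_departure_of_current_berth int_eta_ship_of_current_ship ≠ min_time_arr_at_berth_alt list_time_departure_of_current_berth int_eta_ship_of_current_ship

-- ===== LEMMAS AND PROOFS =====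

-- the survivors of A's buggy while-loop, as a single scan with a skip flag
def pvKeep (eta : Int) : List Int → Bool → List Int
  | [], _ => []
  | t :: ts, true => t :: pvKeep eta ts false
  | t :: ts, false => if t + 1 < eta then pvKeep eta ts true else t :: pvKeep eta ts false

lemma pvKeep_true (eta : Int) (d : List Int) :
    pvKeep eta d true = d.take 1 ++ pvKeep eta (d.drop 1) false := by
  cases d <;> simp [pvKeep]

lemma pvAWhile_eq (l : List Int) (count : Nat) (eta : Int) :
    pvAWhile l count eta = l.take count ++ pvKeep eta (l.drop count) false := by
  induction l, count using pvAWhile.induct eta with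
  | case1 l count h hlt ih =>
      rw [pvAWhile, dif_pos h, if_pos hlt, ih]
      have hd : l.drop count = l[count] :: l.drop (count + 1) :=
        List.drop_eq_getElem_cons h
      rw [hd]
      simp only [pvKeep, if_pos hlt, pvKeep_true]
      rw [List.eraseIdx_eq_take_drop_succ]
      have hlen : (l.take count).length = count := by
        simp [Nat.le_of_lt h]
      have e1 : List.take (count + 1) (l.take count) = l.take count :=
        List.take_of_length_le (by rw [hlen]; omega)
      have e2 : count + 1 - (l.take count).length = 1 := by rw [hlen]; omega
      have e3 : List.drop (count + 1) (l.take count) = [] :=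
        List.drop_eq_nil_of_le (by rw [hlen]; omega)
      have h1 : (l.take count ++ l.drop (count + 1)).take (count + 1)
          = l.take count ++ (l.drop (count + 1)).take 1 := by
        rw [List.take_append, e1, e2]
      have h2 : (l.take count ++ l.drop (count + 1)).drop (count + 1)
          = (l.drop (count + 1)).drop 1 := by
        rw [List.drop_append, e3, e2]
        simp
      rw [h1, h2, List.append_assoc]
  | case2 l count h hlt ih =>
      rw [pvAWhile, dif_pos h, if_neg hlt, ih]
      have hd : l.drop count = l[count] :: l.drop (count + 1) :=
        List.drop_eq_getElem_cons h
      rw [hd]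
      simp only [pvKeep, if_neg hlt]
      rw [List.take_add_one, List.getElem?_eq_getElem h, Option.toList_some,
        List.append_assoc]
      rfl
  | case3 l count h =>
      rw [pvAWhile, dif_neg h]
      have : l.drop count = [] := List.drop_eq_nil_of_le (by omega)
      simp [this, pvKeep, List.take_of_length_le (by omega : l.length ≤ count)]

-- survivors are a sublist of the input
lemma pvKeep_sublist (eta : Int) (l : List Int) (sk : Bool) :
    (pvKeep eta l sk).Sublist l := by
  induction l generalizing sk with
  | nil => simp [pvKeep]
  | cons t ts ih =>
      cases sk with
      | true => simpa [pvKeep] using ih false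
      | false =>
          by_cases h : t + 1 < eta
          · simp only [pvKeep, if_pos h]
            exact (ih true).cons t
          · simpa [pvKeep, h] using ih false

-- every non-deletable element survives
lemma pvKeep_mem_big {eta t : Int} {l : List Int} (sk : Bool)
    (ht : t ∈ l) (hbig : ¬ t + 1 < eta) : t ∈ pvKeep eta l sk := by
  induction l generalizing sk with
  | nil => cases ht
  | cons a ts ih =>
      cases List.mem_cons.mp ht with
      | inl he =>
          subst he
          cases sk with
          | true => simp [pvKeep]
          | false => simp [pvKeep, hbig]
      | inr hm =>
          cases sk with
          | true => simp [pvKeep, ih false hm]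
          | false =>
              by_cases h : a + 1 < eta
              · simp only [pvKeep, if_pos h]; exact ih true hm
              · simp only [pvKeep, if_neg h]; exact List.mem_cons_of_mem _ (ih false hm)

-- B's fold rewritten as a fold of max
lemma pvAlt_eq_foldMax (l : List Int) (eta : Int) :
    min_time_arr_at_berth_alt l eta = l.foldl (fun b t => max b (t + 1)) eta := by
  unfold min_time_arr_at_berth_alt
  congr 1
  funext b t
  by_cases h : t + 1 > b
  · simp [h, max_eq_right (le_of_lt h)]
  · simp [h, max_eq_left (by omega : t + 1 ≤ b)]

lemma pvFoldMax_ge_init (l : List Int) (init : Int) :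
    init ≤ l.foldl (fun b t => max b (t + 1)) init := by
  induction l generalizing init with
  | nil => simp
  | cons a ts ih =>
      simp only [List.foldl_cons]
      exact le_trans (le_max_left _ _) (ih (max init (a + 1)))

lemma pvFoldMax_ge_mem {t : Int} {l : List Int} (init : Int) (ht : t ∈ l) :
    t + 1 ≤ l.foldl (fun b t => max b (t + 1)) init := by
  induction l generalizing init with
  | nil => cases ht
  | cons a ts ih =>
      simp only [List.foldl_cons]
      cases List.mem_cons.mp ht with
      | inl he =>
          subst he
          exact le_trans (le_max_right _ _) (pvFoldMax_ge_init ts _)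
      | inr hm => exact ih _ hm

lemma pvFoldMax_cases (l : List Int) (init : Int) :
    l.foldl (fun b t => max b (t + 1)) init = init ∨
      ∃ t ∈ l, l.foldl (fun b t => max b (t + 1)) init = t + 1 := by
  induction l generalizing init with
  | nil => exact Or.inl rfl
  | cons a ts ih =>
      simp only [List.foldl_cons]
      rcases ih (max init (a + 1)) with h | ⟨t, ht, he⟩
      · rw [h]
        rcases max_cases init (a + 1) with ⟨h1, _⟩ | ⟨h1, _⟩
        · exact Or.inl h1
        · exact Or.inr ⟨a, List.mem_cons_self, h1⟩
      · exact Or.inr ⟨t, List.mem_cons_of_mem _ ht, he⟩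

-- ===== VERDICT (by name: the statement is the Claim_ definition above) =====
theorem min_time_arr_at_berth_spec : Claim_unchanged_min_time_arr_at_berth := by
  intro l eta _ hnd
  unfold min_time_arr_at_berth
  rw [pvAlt_eq_foldMax]
  simp only [pvAWhile_eq, List.take_zero, List.drop_zero, List.nil_append]
  set K := pvKeep eta l false with hK
  set R := l.foldl (fun b t => max b (t + 1)) eta with hR
  by_cases hke : K = []
  · -- no survivors: every element is deletable, and ¬D forces length ≤ 1
    rw [if_pos hke]
    have hall : ∀ t ∈ l, t + 1 < eta := by
      intro t ht
      by_contra hbig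
      exact (List.ne_nil_of_mem (pvKeep_mem_big false ht hbig)) (hK ▸ hke)
    have hlen : l.length < 2 := by
      by_contra h
      exact hnd ⟨hall, by omega⟩
    match l, hlen with
    | [], _ => simp [hR]
    | [a], _ =>
        have := hall a List.mem_cons_self
        simp only [hR, List.foldl_cons, List.foldl_nil]
        omega
  · rw [if_neg hke]
    obtain ⟨x, t, hxt⟩ := List.exists_cons_of_ne_nil hke
    rw [hxt, PySem.List.max?_id_cons, Option.getD_some]
    have hmax : PySem.List.max? K (fun y => y) = some (t.foldl max x) := by
      rw [hxt, PySem.List.max?_id_cons]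
    have hmK : t.foldl max x ∈ K := PySem.List.max?_mem hmax
    have hisMax : ∀ y ∈ K, y ≤ t.foldl max x := fun y hy =>
      PySem.List.max?_isMax hmax y hy
    set m := t.foldl max x with hm
    have hmL : m ∈ l := (pvKeep_sublist eta l false).mem (hK ▸ hmK)
    -- there is a survivor s with eta ≤ s + 1
    have hsurv : ∃ s ∈ l, ¬ s + 1 < eta := by
      by_contra hno
      push Not at hno
      have hlen : l.length < 2 := by
        by_contra h
        exact hnd ⟨fun s hs => hno s hs, by omega⟩
      match l, hlen with
      | [], _ => exact hke (by simp [hK, pvKeep])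
      | [a], _ =>
          have ha := hno a List.mem_cons_self
          apply hke
          rw [hK]
          simp [pvKeep, ha]
    apply le_antisymm
    · -- m + 1 ≤ R
      exact pvFoldMax_ge_mem eta hmL
    · -- R ≤ m + 1
      rcases pvFoldMax_cases l eta with h | ⟨s, hs, he⟩
      · obtain ⟨s, hsl, hbig⟩ := hsurv
        have : s ≤ m := hisMax s (hK ▸ pvKeep_mem_big false hsl hbig)
        rw [← hR] at h
        omega
      · have hRge : eta ≤ R := pvFoldMax_ge_init l eta
        have hbig : ¬ s + 1 < eta := by rw [← hR] at he; omega
        have : s ≤ m := hisMax s (hK ▸ pvKeep_mem_big false hs hbig)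
        rw [← hR] at he
        omega

theorem min_time_arr_at_berth_changed : Claim_changed_min_time_arr_at_berth := by
  unfold Claim_changed_min_time_arr_at_berth
  refine ⟨by decide, by decide, ?_, by decide, by decide⟩
  show min_time_arr_at_berth [0, 1] 5 = 2
  unfold min_time_arr_at_berth
  rw [pvAWhile_eq]
  decide

theorem min_time_arr_at_berth_tight : Claim_exact_min_time_arr_at_berth := by
  intro l eta _ ⟨hall, hlen⟩
  match l, hlen with
  | a :: b :: ts, _ =>
      unfold min_time_arr_at_berth
      rw [pvAlt_eq_foldMax]
      simp only [pvAWhile_eq, List.take_zero, List.drop_zero, List.nil_append]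
      have ha := hall a List.mem_cons_self
      have hKexp : pvKeep eta (a :: b :: ts) false = b :: pvKeep eta ts false := by
        simp [pvKeep, ha]
      rw [hKexp]
      simp only [if_neg (List.cons_ne_nil b _)]
      rw [PySem.List.max?_id_cons, Option.getD_some]
      have hmax : PySem.List.max? (b :: pvKeep eta ts false) (fun y => y)
          = some ((pvKeep eta ts false).foldl max b) := PySem.List.max?_id_cons b _
      set m := (pvKeep eta ts false).foldl max b with hm
      have hmK : m ∈ b :: pvKeep eta ts false := PySem.List.max?_mem hmax
      have hmL : m ∈ a :: b :: ts := by
        have hsub : (b :: pvKeep eta ts false).Sublist (a :: b :: ts) := by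
          rw [← hKexp]; exact pvKeep_sublist eta _ false
        exact hsub.mem hmK
      have hmlt : m + 1 < eta := hall m hmL
      have hRge : eta ≤ (a :: b :: ts).foldl (fun b t => max b (t + 1)) eta :=
        pvFoldMax_ge_init _ eta
      omega
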